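-- pv_equiv track=rewrite | github.com/miayuxin/leetcode | No.581_Shortest Unsorted Continuous Subarray.py | findLeftSwapPoint
-- ===== SOURCE A (Python) =====
-- def findLeftSwapPoint(nums):
--     #Phase 1
--     left = 0
--     for i in range(1, len(nums)):
--         if (nums[i] < nums[i-1]):
--             left = (i-1)
--             break
--     #Phase 2
--     for i in range(left + 1, len(nums)):
--         while (left >=0 and nums[left] > nums[i]):
--             left -= 1
--     return left
-- ===== SOURCE B (Python) =====
-- def findLeftSwapPoint(nums):
--     # index p of the first adjacent descent (nums[p+1] < nums[p]), else None
--     p = next((i for i, (a, b) in enumerate(zip(nums, nums[1:])) if b < a), None)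
--     if p is None:
--         return 0
--     m = min(nums[p + 1:])
--     left = p
--     while left >= 0 and nums[left] > m:
--         left -= 1
--     return left
-- ===== Notes on version B (the rewrite author's own statement) =====
-- stated objective: simpler
-- what changed: A's interleaved phase 2 (a nested while decrementing left inside the loop over i) is replaced by one suffix-minimum reduction followed by a single downward scan from the first descent index.
import Mathlib
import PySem

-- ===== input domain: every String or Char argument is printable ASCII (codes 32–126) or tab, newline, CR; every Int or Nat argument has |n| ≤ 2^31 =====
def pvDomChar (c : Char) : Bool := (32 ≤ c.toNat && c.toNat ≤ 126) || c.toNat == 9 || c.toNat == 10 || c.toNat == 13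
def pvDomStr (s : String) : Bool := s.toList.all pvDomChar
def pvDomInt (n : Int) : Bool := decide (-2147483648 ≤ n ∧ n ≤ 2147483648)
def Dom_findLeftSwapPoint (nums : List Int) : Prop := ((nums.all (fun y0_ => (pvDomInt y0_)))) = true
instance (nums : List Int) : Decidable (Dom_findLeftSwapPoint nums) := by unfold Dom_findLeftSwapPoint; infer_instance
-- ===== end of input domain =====

-- B replaces A's interleaved phase-2 (inner while inside the loop over i) by a suffix-minimum
-- reduction followed by one downward scan: a simpler, plainly one-directional decomposition.

-- ===== PORT A =====
-- nums[i] for an index that A only evaluates in range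
def pvIdx (nums : List Int) (i : Int) : Int := PySem.List.pyGetD nums i 0

-- Phase 1: first i in range(1, len) with nums[i] < nums[i-1] sets left = i-1 and breaks
def pvPhase1 (nums : List Int) : List Int → Int
  | [] => 0
  | i :: rest => if pvIdx nums i < pvIdx nums (i - 1) then i - 1 else pvPhase1 nums rest

-- the inner while of phase 2
def pvInner (nums : List Int) (left x : Int) : Int :=
  if 0 ≤ left ∧ pvIdx nums left > x then pvInner nums (left - 1) x else left
  termination_by (left + 1).toNat
  decreasing_by omega

-- Phase 2: for i in range(left+1, len)
def pvPhase2 (nums : List Int) (left : Int) : List Int → Int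
  | [] => left
  | i :: rest => pvPhase2 nums (pvInner nums left (pvIdx nums i)) rest

def findLeftSwapPoint (nums : List Int) : Int :=
  let left := pvPhase1 nums (PySem.List.pyRange 1 (nums.length : Int) 1)
  pvPhase2 nums left (PySem.List.pyRange (left + 1) (nums.length : Int) 1)

-- ===== PORT B =====
-- index of the first adjacent descent (next(... enumerate(zip(nums, nums[1:])) ...), None)
def pvFirstDescent : List Int → Option Nat
  | a :: b :: rest => if b < a then some 0 else (pvFirstDescent (b :: rest)).map (· + 1)
  | _ => none

-- the single downward scan: while left >= 0 and nums[left] > m: left -= 1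
def pvScanDown (nums : List Int) (left m : Int) : Int :=
  if 0 ≤ left ∧ pvIdx nums left > m then pvScanDown nums (left - 1) m else left
  termination_by (left + 1).toNat
  decreasing_by omega

def findLeftSwapPoint_alt (nums : List Int) : Int :=
  match pvFirstDescent nums with
  | none => 0
  | some p =>
    let m := (PySem.List.min? (PySem.List.slice nums (some ((p : Int) + 1)) none) (fun x => x)).getD 0
    pvScanDown nums (p : Int) m

-- ===== PRECONDITION & SPEC =====
def Spec_findLeftSwapPoint (nums : List Int) (out : Int) : Prop := out = findLeftSwapPoint_alt nums
instance (nums : List Int) (out : Int) : Decidable (Spec_findLeftSwapPoint nums out) := by unfold Spec_findLeftSwapPoint; infer_instance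

-- ===== CLAIM (what is proved, stated in full; the proofs are below) =====
def Claim_equal_findLeftSwapPoint : Prop := ∀ (nums : List Int), Dom_findLeftSwapPoint nums → Spec_findLeftSwapPoint nums (findLeftSwapPoint nums)

-- ===== LEMMAS AND PROOFS =====

theorem pvInner_unfold (nums : List Int) (l x : Int) :
    pvInner nums l x = if 0 ≤ l ∧ pvIdx nums l > x then pvInner nums (l - 1) x else l := by
  rw [pvInner]

theorem pvScanDown_unfold (nums : List Int) (l m : Int) :
    pvScanDown nums l m = if 0 ≤ l ∧ pvIdx nums l > m then pvScanDown nums (l - 1) m else l := by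
  rw [pvScanDown]

-- B's downward scan is the same loop as A's inner while
theorem pvScanDown_eq_pvInner (nums : List Int) : ∀ (k : Nat) (l m : Int), (l + 1).toNat ≤ k →
    pvScanDown nums l m = pvInner nums l m := by
  intro k
  induction k with
  | zero =>
    intro l m hk
    rw [pvScanDown_unfold, pvInner_unfold]
    have : ¬ (0 ≤ l) := by omega
    simp [this]
  | succ k ih =>
    intro l m hk
    rw [pvScanDown_unfold, pvInner_unfold]
    split_ifs with h
    · exact ih (l - 1) m (by omega)
    · rfl

-- key lemma: composing two inner-while passes is one pass with the min of the two bounds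
theorem pvInner_pvInner (nums : List Int) : ∀ (k : Nat) (l a b : Int), (l + 1).toNat ≤ k →
    pvInner nums (pvInner nums l a) b = pvInner nums l (min a b) := by
  intro k
  induction k with
  | zero =>
    intro l a b hk
    have h : ¬ (0 ≤ l) := by omega
    rw [pvInner_unfold nums l a]
    simp [h]
    rw [pvInner_unfold nums l b, pvInner_unfold nums l (min a b)]
    simp [h]
  | succ k ih =>
    intro l a b hk
    by_cases hl : 0 ≤ l
    · by_cases ha : pvIdx nums l > a
      · -- first pass decrements
        have hmin : pvIdx nums l > min a b := lt_of_le_of_lt (min_le_left a b) ha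
        rw [pvInner_unfold nums l a, if_pos ⟨hl, ha⟩,
            pvInner_unfold nums l (min a b), if_pos ⟨hl, hmin⟩]
        exact ih (l - 1) a b (by omega)
      · -- first pass stops at l: pvIdx l ≤ a
        rw [pvInner_unfold nums l a, if_neg (by tauto)]
        by_cases hb : pvIdx nums l > b
        · -- min a b = b here since pvIdx l ≤ a and pvIdx l > b gives b < a
          have hba : b < a := lt_of_lt_of_le hb (not_lt.mp ha)
          have : min a b = b := min_eq_right (le_of_lt hba)
          rw [this]
        · have h1 : ¬ (0 ≤ l ∧ pvIdx nums l > b) := by tauto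
          have h2 : ¬ (0 ≤ l ∧ pvIdx nums l > min a b) := by
            intro ⟨_, hc⟩
            rcases min_cases a b with ⟨he, _⟩ | ⟨he, _⟩ <;> rw [he] at hc <;> omega
          rw [pvInner_unfold nums l b, if_neg h1,
              pvInner_unfold nums l (min a b), if_neg h2]
    · have h : ∀ x, pvInner nums l x = l := by
        intro x; rw [pvInner_unfold]; simp [hl]
      rw [h a, h b, h (min a b)]

-- phase 2 over an index list is a fold of the inner while over the fetched values
theorem pvPhase2_eq_foldl (nums : List Int) : ∀ (is : List Int) (l : Int),
    pvPhase2 nums l is = (is.map (pvIdx nums)).foldl (fun l v => pvInner nums l v) l := by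
  intro is
  induction is with
  | nil => intro l; rfl
  | cons i rest ih => intro l; simp [pvPhase2, ih]

-- folding the inner while over values is one pass with their running minimum
theorem foldl_pvInner_min (nums : List Int) : ∀ (vs : List Int) (x l : Int),
    vs.foldl (fun l v => pvInner nums l v) (pvInner nums l x) = pvInner nums l (vs.foldl min x) := by
  intro vs
  induction vs with
  | nil => intro x l; rfl
  | cons v vs ih =>
    intro x l
    simp only [List.foldl_cons]
    rw [pvInner_pvInner nums ((l + 1).toNat) l x v (le_refl _), ih]

-- the indices range(j, len) fetch exactly the suffix drop j
theorem map_pvIdx_pyRange (nums : List Int) : ∀ (d j : Nat), nums.length - j ≤ d →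
    (PySem.List.pyRange (j : Int) (nums.length : Int) 1).map (pvIdx nums) = nums.drop j := by
  intro d
  induction d with
  | zero =>
    intro j hj
    have hle : nums.length ≤ j := by omega
    rw [PySem.List.pyRange_one_eq_nil (show (nums.length : Int) ≤ (j : Int) by omega)]
    rw [List.drop_eq_nil_iff.mpr (by omega)]
    rfl
  | succ d ih =>
    intro j hj
    by_cases hlt : j < nums.length
    · rw [PySem.List.pyRange_one_cons (by omega)]
      have hcast : (j : Int) + 1 = ((j + 1 : Nat) : Int) := by push_cast; ring
      rw [List.map_cons, hcast, ih (j + 1) (by omega)]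
      have : pvIdx nums (j : Int) = nums[j] := by
        simp [pvIdx, PySem.List.pyGetD_natCast, List.getD_eq_getElem?_getD,
              List.getElem?_eq_getElem hlt]
      rw [this, List.drop_eq_getElem_cons hlt]
    · have hle : nums.length ≤ j := by omega
      rw [PySem.List.pyRange_one_eq_nil (show (nums.length : Int) ≤ (j : Int) by omega)]
      rw [List.drop_eq_nil_iff.mpr (by omega)]
      rfl

-- a first descent lies strictly inside the list
theorem pvFirstDescent_lt (l : List Int) : ∀ p, pvFirstDescent l = some p → p + 1 < l.length := by
  induction l with
  | nil => intro p h; simp [pvFirstDescent] at h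
  | cons a t ih =>
    intro p h
    cases t with
    | nil => simp [pvFirstDescent] at h
    | cons b rest =>
      rw [pvFirstDescent] at h
      split_ifs at h with hba
      · cases h; simp
      · simp only [Option.map_eq_some_iff] at h
        obtain ⟨q, hq, rfl⟩ := h
        have := ih q hq
        simp at this ⊢
        omega

-- no descent means the head is ≤ every later element
theorem pvFirstDescent_none_le : ∀ (t : List Int) (a : Int),
    pvFirstDescent (a :: t) = none → ∀ y ∈ t, a ≤ y := by
  intro t
  induction t with
  | nil => intro a _ y hy; simp at hy
  | cons b rest ih =>
    intro a h y hy
    by_cases hba : b < a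
    · rw [pvFirstDescent, if_pos hba] at h; simp at h
    · rw [pvFirstDescent, if_neg hba] at h
      simp only [Option.map_eq_none_iff] at h
      rcases List.mem_cons.mp hy with rfl | hy'
      · omega
      · exact le_trans (by omega) (ih b h y hy')

-- phase 1 computes the first-descent index (0 when there is none)
theorem pvPhase1_eq_aux (nums : List Int) : ∀ (d k : Nat), nums.length - k ≤ d → k ≤ nums.length →
    pvPhase1 nums (PySem.List.pyRange ((k : Int) + 1) (nums.length : Int) 1) =
      (match pvFirstDescent (nums.drop k) with
       | none => 0
       | some p => (k : Int) + (p : Int)) := by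
  intro d
  induction d with
  | zero =>
    intro k hd hk
    have hk' : nums.length ≤ k := by omega
    have h1 : nums.drop k = [] := List.drop_eq_nil_iff.mpr (by omega)
    rw [PySem.List.pyRange_one_eq_nil (by omega), h1]
    rfl
  | succ d ih =>
    intro k hd hk
    by_cases hlt : k + 1 < nums.length
    · -- drop k = nums[k] :: nums[k+1] :: drop (k+2) nums
      have hk0 : k < nums.length := by omega
      have hdk : nums.drop k = nums[k] :: nums.drop (k + 1) := List.drop_eq_getElem_cons hk0
      have hdk1 : nums.drop (k + 1) = nums[k + 1] :: nums.drop (k + 2) := List.drop_eq_getElem_cons hlt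
      have hidx : ∀ (j : Nat) (hj : j < nums.length), pvIdx nums (j : Int) = nums[j] := by
        intro j hj
        simp [pvIdx, PySem.List.pyGetD_natCast, List.getD_eq_getElem?_getD,
              List.getElem?_eq_getElem hj]
      rw [PySem.List.pyRange_one_cons (by omega)]
      simp only [pvPhase1]
      have e1 : pvIdx nums ((k : Int) + 1) = nums[k + 1] := by
        have : (k : Int) + 1 = ((k + 1 : Nat) : Int) := by push_cast; ring
        rw [this]; exact hidx (k + 1) hlt
      have e2 : pvIdx nums ((k : Int) + 1 - 1) = nums[k] := by
        have : (k : Int) + 1 - 1 = (k : Int) := by ring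
        rw [this]; exact hidx k hk0
      rw [e1, e2, hdk, hdk1]
      rw [pvFirstDescent]
      by_cases hba : nums[k + 1] < nums[k]
      · rw [if_pos hba, if_pos hba]
        simp
      · rw [if_neg hba, if_neg hba]
        have hcast : (k : Int) + 1 + 1 = ((k + 1 : Nat) : Int) + 1 := by norm_cast
        rw [hcast, ih (k + 1) (by omega) (by omega)]
        rw [← hdk1]
        cases hfd : pvFirstDescent (nums.drop (k + 1)) with
        | none => simp
        | some q => simp; ring
    · -- at most one element left: no pair, empty range
      have h1 : pvFirstDescent (nums.drop k) = none := by
        rcases List.eq_nil_or_concat (nums.drop k) with h | _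
        · rw [h]; rfl
        · have hlen : (nums.drop k).length ≤ 1 := by simp; omega
          cases hdk : nums.drop k with
          | nil => rfl
          | cons a t =>
            cases t with
            | nil => rfl
            | cons b r => rw [hdk] at hlen; simp at hlen
      rw [PySem.List.pyRange_one_eq_nil (by omega), h1]
      rfl

theorem pvPhase1_eq (nums : List Int) :
    pvPhase1 nums (PySem.List.pyRange 1 (nums.length : Int) 1) =
      (match pvFirstDescent nums with
       | none => 0
       | some p => (p : Int)) := by
  have := pvPhase1_eq_aux nums nums.length 0 (by omega) (by omega)
  simpa using this

theorem main_eq (nums : List Int) : findLeftSwapPoint nums = findLeftSwapPoint_alt nums := by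
  unfold findLeftSwapPoint findLeftSwapPoint_alt
  rw [pvPhase1_eq]
  cases hfd : pvFirstDescent nums with
  | none =>
    -- left = 0; phase 2 leaves it at 0 because the list is sorted
    simp only
    rw [pvPhase2_eq_foldl]
    have h01 : (0 : Int) + 1 = ((1 : Nat) : Int) := by norm_num
    rw [h01, map_pvIdx_pyRange nums nums.length 1 (by omega)]
    cases nums with
    | nil => rfl
    | cons h t =>
      cases ht : t with
      | nil => rfl
      | cons v vs =>
        subst ht
        simp only [List.drop_one, List.tail_cons, List.foldl_cons]
        rw [foldl_pvInner_min (h :: v :: vs) vs v 0]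
        -- h ≤ min of the tail, so the scan does not move
        have hmem : vs.foldl min v ∈ v :: vs := by
          have := PySem.List.min?_id_cons (κ := Int) v vs
          exact PySem.List.min?_mem this
        have hle : h ≤ vs.foldl min v :=
          pvFirstDescent_none_le (v :: vs) h hfd _ hmem
        rw [pvInner_unfold]
        have hno : ¬ ((0:Int) ≤ 0 ∧ pvIdx (h :: v :: vs) 0 > vs.foldl min v) := by
          intro ⟨_, hc⟩
          have hh : pvIdx (h :: v :: vs) 0 = h := by simp [pvIdx, PySem.List.pyGetD_zero_cons]
          omega
        rw [if_neg hno]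
  | some p =>
    simp only
    have hp1 : p + 1 < nums.length := pvFirstDescent_lt nums p hfd
    rw [pvPhase2_eq_foldl]
    have hcast : (p : Int) + 1 = ((p + 1 : Nat) : Int) := by push_cast; ring
    rw [hcast, map_pvIdx_pyRange nums nums.length (p + 1) (by omega)]
    rw [PySem.List.slice_from_natCast]
    cases hdk : nums.drop (p + 1) with
    | nil =>
      exfalso
      have := List.drop_eq_nil_iff.mp hdk
      omega
    | cons v vs =>
      simp only [List.foldl_cons]
      rw [foldl_pvInner_min nums vs v (p : Int)]
      rw [PySem.List.min?_id_cons v vs]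
      simp only [Option.getD_some]
      exact (pvScanDown_eq_pvInner nums (((p : Int)) + 1).toNat (p : Int) (vs.foldl min v) (le_refl _)).symm

-- ===== VERDICT (by name: the statement is the Claim_ definition above) =====
theorem findLeftSwapPoint_spec : Claim_equal_findLeftSwapPoint := by
  intro nums _
  unfold Spec_findLeftSwapPoint
  exact main_eq nums
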